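-- pv_equiv track=rewrite | github.com/chong-yao/competitive-programming | MCC2024/test4.py | solve
-- ===== SOURCE A (Python) =====
-- MOD = 998244353
--
-- def solve(n, k, s):
--     # Reduce k modulo (MOD-1) to avoid overflows
--     k = k % (MOD - 1)
--
--     arr = []
--     # Precompute 2^k % MOD for large k
--     power_of_2_k = pow(2, k, MOD)
--
--     # Calculate the transformation effects for each adjacent pair in the string
--     for i in range(1, n):
--         tmp = s[i-1] + s[i]
--
--         if tmp == "00":
--             arr.append(power_of_2_k)  # 2^k % MOD for "00"
--         elif tmp == "11":
--             # Special case for "11", where the transformation is complex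
--             arr.append((((power_of_2_k) + 2 * ((-1)**k)) % MOD * pow(3, MOD-2, MOD)) % MOD)
--         else:
--             # Special case for "01" or "10"
--             arr.append(((power_of_2_k + 1) // 3) % MOD)
--
--     # Now we will calculate the final result using the computed array
--     n -= 1
--     ans = 0
--     for i in range(n):
--         ans += arr[i] * (n - i) * (i + 1)
--         ans %= MOD
--
--     return ans
-- ===== SOURCE B (Python) =====
-- MOD = 998244353
--
-- def solve(n, k, s):
--     # Substring-sum DP: f(r) = f(r-1) + r*c_r is the total of all segment sums
--     # of the pair-constants ending at r; summing f over r gives the answer, so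
--     # the positional weights (n-i)*i of A never appear and no array is built.
--     k = k % (MOD - 1)
--     p = pow(2, k, MOD)
--     c11 = ((p + 2 * ((-1) ** k)) % MOD * pow(3, MOD - 2, MOD)) % MOD
--     coth = ((p + 1) // 3) % MOD
--     ans = 0
--     g = 0
--     for i in range(1, n):
--         pair = s[i - 1] + s[i]
--         c = p if pair == "00" else c11 if pair == "11" else coth
--         g += i * c
--         ans += g
--     return ans % MOD
-- ===== Notes on version B (the rewrite author's own statement) =====
-- stated objective: alternative
-- what changed: B computes the answer as a substring-sum DP: one running accumulator g = g + i*c_i (the total of all pair-segment sums ending at i) is added into ans each step, so A's explicit positional weights (n-i)*i, its intermediate array and its second summation loop all disappear; the weights arise implicitly from the double accumulation.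
import Mathlib
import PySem

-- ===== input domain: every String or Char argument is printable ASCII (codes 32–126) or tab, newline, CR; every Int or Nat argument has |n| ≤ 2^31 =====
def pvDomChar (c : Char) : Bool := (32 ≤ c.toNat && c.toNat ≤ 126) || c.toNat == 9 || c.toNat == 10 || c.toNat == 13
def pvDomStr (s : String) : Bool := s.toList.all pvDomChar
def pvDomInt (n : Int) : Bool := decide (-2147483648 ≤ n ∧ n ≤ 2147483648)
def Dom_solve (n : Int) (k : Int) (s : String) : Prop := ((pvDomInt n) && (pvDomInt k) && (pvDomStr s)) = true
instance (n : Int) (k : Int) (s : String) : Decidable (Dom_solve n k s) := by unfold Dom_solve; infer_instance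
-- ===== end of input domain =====

-- B replaces A's explicit positional weights (n-i)*i, intermediate array and second loop by a
-- substring-sum DP (f(r) = f(r-1) + r*c_r accumulated into the answer); objective: alternative.

-- ===== PORT A =====
def MODP : Int := 998244353

-- Python's b ** e on ints (e ≥ 0): square-and-multiply, as CPython's int.__pow__ computes it
def pyIntPow (b : Int) (e : Nat) : Int :=
  if _h : e = 0 then 1
  else
    let r := pyIntPow (b * b) (e / 2)
    if e % 2 = 1 then r * b else r
decreasing_by exact Nat.div_lt_self (Nat.pos_of_ne_zero _h) (by norm_num)

def solve (n : Int) (k : Int) (s : String) : Int :=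
  let kk := PySem.Int.mod k (MODP - 1)
  let cs := s.toList
  let p2k := PySem.Int.powMod 2 kk.toNat MODP
  let arr : List Int :=
    (PySem.List.pyRange 1 n 1).foldl (fun arr i =>
      if [PySem.List.pyGetD cs (i - 1) ' ', PySem.List.pyGetD cs i ' '] = ['0', '0'] then
        arr ++ [p2k]
      else if [PySem.List.pyGetD cs (i - 1) ' ', PySem.List.pyGetD cs i ' '] = ['1', '1'] then
        arr ++ [PySem.Int.mod (PySem.Int.mod (p2k + 2 * pyIntPow (-1) kk.toNat) MODP *
                  PySem.Int.powMod 3 (MODP - 2).toNat MODP) MODP]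
      else
        arr ++ [PySem.Int.mod (PySem.Int.floordiv (p2k + 1) 3) MODP]) []
  let m := n - 1
  (PySem.List.pyRange 0 m 1).foldl (fun ans i =>
      PySem.Int.mod (ans + PySem.List.pyGetD arr i 0 * (m - i) * (i + 1)) MODP) 0

-- ===== PORT B =====
def solve_alt (n : Int) (k : Int) (s : String) : Int :=
  let kk := PySem.Int.mod k (MODP - 1)
  let p := PySem.Int.powMod 2 kk.toNat MODP
  let c11 := PySem.Int.mod (PySem.Int.mod (p + 2 * pyIntPow (-1) kk.toNat) MODP *
               PySem.Int.powMod 3 (MODP - 2).toNat MODP) MODP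
  let coth := PySem.Int.mod (PySem.Int.floordiv (p + 1) 3) MODP
  let cs := s.toList
  -- (ans, g) with g += i*c; ans += g  — 'g' is the sum of all pair-segment sums ending at i
  let r :=
    (PySem.List.pyRange 1 n 1).foldl (fun (acc : Int × Int) i =>
      let c := if [PySem.List.pyGetD cs (i - 1) ' ', PySem.List.pyGetD cs i ' '] = ['0', '0'] then p
               else if [PySem.List.pyGetD cs (i - 1) ' ', PySem.List.pyGetD cs i ' '] = ['1', '1'] then c11
               else coth
      (acc.1 + (acc.2 + i * c), acc.2 + i * c)) (0, 0)
  PySem.Int.mod r.1 MODP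

-- ===== PRECONDITION & SPEC =====
-- Pre_ excludes exactly the inputs where A raises IndexError: n ≥ 2 with n > len(s)
-- makes s[i] go out of range in A's pair loop.
def Pre_solve (n : Int) (k : Int) (s : String) : Prop :=
  n ≤ 1 ∨ n ≤ (s.toList.length : Int)
instance (n : Int) (k : Int) (s : String) : Decidable (Pre_solve n k s) := by
  unfold Pre_solve; infer_instance

def pvWitness_solve : Int × Int × String := (3, 5, "010")

def Spec_solve (n : Int) (k : Int) (s : String) (out : Int) : Prop := out = solve_alt n k s
instance (n : Int) (k : Int) (s : String) (out : Int) : Decidable (Spec_solve n k s out) := by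
  unfold Spec_solve; infer_instance

-- ===== CLAIM (what is proved, stated in full; the proofs are below) =====
def Claim_equal_solve : Prop := ∀ (n : Int) (k : Int) (s : String),
  Dom_solve n k s → Pre_solve n k s → Spec_solve n k s (solve n k s)

-- ===== LEMMAS AND PROOFS =====

-- A's first loop ('arr.append(…)' under the pair branches) builds the map of the per-pair constant
theorem afold (cs : List Char) (v00 v11 voth : Int) (l : List Int) (acc : List Int) :
    l.foldl (fun arr i =>
      if [PySem.List.pyGetD cs (i - 1) ' ', PySem.List.pyGetD cs i ' '] = ['0', '0'] then
        arr ++ [v00]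
      else if [PySem.List.pyGetD cs (i - 1) ' ', PySem.List.pyGetD cs i ' '] = ['1', '1'] then
        arr ++ [v11]
      else arr ++ [voth]) acc
    = acc ++ l.map (fun i =>
        if [PySem.List.pyGetD cs (i - 1) ' ', PySem.List.pyGetD cs i ' '] = ['0', '0'] then v00
        else if [PySem.List.pyGetD cs (i - 1) ' ', PySem.List.pyGetD cs i ' '] = ['1', '1'] then v11
        else voth) := by
  rw [PySem.List.foldl_congr_mem _ _
      (fun arr i => arr ++
        [if [PySem.List.pyGetD cs (i - 1) ' ', PySem.List.pyGetD cs i ' '] = ['0', '0'] then v00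
         else if [PySem.List.pyGetD cs (i - 1) ' ', PySem.List.pyGetD cs i ' '] = ['1', '1'] then v11
         else voth]) acc
      (by intro a x _; dsimp only; split_ifs <;> rfl)]
  exact PySem.List.foldl_append_singleton_eq_map _ _ _

-- running 'ans = (ans + f x) % MOD' over a list from 0 is the sum mod MOD
theorem modfold (l : List Int) (f : Int → Int) :
    ∀ a : Int, l.foldl (fun acc x => PySem.Int.mod (acc + f x) MODP) (PySem.Int.mod a MODP)
      = PySem.Int.mod (a + (l.map f).sum) MODP := by
  induction l with
  | nil => intro a; simp
  | cons x t ih =>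
    intro a
    have hM : (0 : Int) < MODP := by decide
    have h1 : PySem.Int.mod (PySem.Int.mod a MODP + f x) MODP
        = PySem.Int.mod (a + f x) MODP := by
      simp only [PySem.Int.mod_eq_emod_of_pos hM]
      exact Int.emod_add_emod a MODP (f x)
    simp only [List.foldl_cons, List.map_cons, List.sum_cons, h1, ih (a + f x), add_assoc]

theorem modfold0 (l : List Int) (f : Int → Int) :
    l.foldl (fun acc x => PySem.Int.mod (acc + f x) MODP) 0
      = PySem.Int.mod ((l.map f).sum) MODP := by
  have h := modfold l f 0
  rw [show PySem.Int.mod 0 MODP = 0 from by decide] at h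
  rw [h, zero_add]

-- one step of unfolding the weighted range sum in bfold's closed form
theorem bsum (w : Int → Int) (x : Int) (t : List Int) :
    ((List.range (t.length + 1)).map
        (fun (j : Nat) => (((t.length + 1 : Nat) : Int) - (j : Int)) * w ((x :: t).getD j 0))).sum
    = ((t.length : Int) + 1) * w x +
      ((List.range t.length).map
        (fun (j : Nat) => ((t.length : Int) - (j : Int)) * w (t.getD j 0))).sum := by
  rw [List.range_succ_eq_map]
  simp only [List.map_cons, List.map_map, List.sum_cons, List.getD_cons_zero,
    Function.comp_def, Nat.succ_eq_add_one, List.getD_cons_succ]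
  refine congrArg₂ (· + ·) ?_ (congrArg List.sum (List.map_congr_left ?_))
  · push_cast; ring
  · intro j _
    push_cast
    ring

-- B's double accumulator: ans collects, for each processed element, the running value of
-- g = Σ w(seen); closed form: each w(l[j]) ends up counted (len − j) times.
theorem bfold (w : Int → Int) : ∀ (l : List Int) (a g : Int),
    l.foldl (fun (acc : Int × Int) x => (acc.1 + (acc.2 + w x), acc.2 + w x)) (a, g)
    = (a + (l.length : Int) * g +
        ((List.range l.length).map
          (fun (j : Nat) => ((l.length : Int) - (j : Int)) * w (l.getD j 0))).sum,
       g + (l.map w).sum) := by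
  intro l
  induction l with
  | nil => intro a g; simp
  | cons x t ih =>
    intro a g
    rw [List.foldl_cons, ih]
    refine Prod.ext ?_ ?_
    · show a + (g + w x) + (t.length : Int) * (g + w x) + _
        = a + ((x :: t).length : Int) * g + _
      simp only [List.length_cons]
      rw [bsum]
      push_cast
      ring
    · simp only [List.map_cons, List.sum_cons]
      ring

-- ===== VERDICT (by name: the statement is the Claim_ definition above) =====
theorem solve_spec : Claim_equal_solve := by
  intro n k s _ _
  unfold Spec_solve
  simp only [solve, solve_alt]
  rw [afold, bfold, modfold0]
  dsimp only
  simp only [List.nil_append, zero_add, mul_zero, add_zero]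
  congr 1
  rw [PySem.List.pyRange_one 0 (n - 1), PySem.List.pyRange_one 1 n]
  simp only [List.map_map, sub_zero, Function.comp_def, zero_add,
    List.length_map, List.length_range]
  refine congrArg List.sum ?_
  apply List.map_congr_left
  intro t ht
  rw [List.mem_range] at ht
  have hm : (((n - 1).toNat : Nat) : Int) = n - 1 := by omega
  rw [PySem.List.pyGetD_natCast, PySem.List.getD_map_range _ _ _ _ ht,
      PySem.List.getD_map_range _ _ _ _ ht, hm]
  split_ifs <;> ring
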